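-- pv_equiv track=rewrite | github.com/AceOfKnife/AoC-2025 | day-3/day3.py | getLargestSuffix
-- ===== SOURCE A (Python) =====
-- def getLargestSuffix(banks):
--     largestSuffix = []
--
--     for bank in banks:
--         suffix = [0] * len(bank)
--         suffix[-1] = bank[-1]
--         for i in reversed(range(len(bank) - 1)):
--             suffix[i] = max(bank[i], suffix[i+1])
--         largestSuffix.append(suffix)
--
--     return largestSuffix
-- ===== SOURCE B (Python) =====
-- def getLargestSuffix(banks):
--     largestSuffix = []
--     for bank in banks:
--         # forward pass: monotonic stack of (value, count) blocks with strictly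
--         # decreasing values; a new element absorbs all smaller-or-equal blocks
--         blocks = []
--         for x in bank:
--             count = 1
--             while blocks and blocks[-1][0] <= x:
--                 count += blocks.pop()[1]
--             blocks.append((x, count))
--         suffix = []
--         for value, count in blocks:
--             suffix += [value] * count
--         largestSuffix.append(suffix)
--     return largestSuffix
-- ===== Notes on version B (the rewrite author's own statement) =====
-- stated objective: alternative
-- what changed: Replaces A's backward index-assignment pass (suffix[i] = max(bank[i], suffix[i+1]) into a preallocated array) by a forward monotonic-stack algorithm: scan each bank left to right keeping a stack of (value, count) blocks with strictly decreasing values, merging smaller-or-equal blocks into each new element, then expand the blocks into the suffix-maximum array.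
import Mathlib
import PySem

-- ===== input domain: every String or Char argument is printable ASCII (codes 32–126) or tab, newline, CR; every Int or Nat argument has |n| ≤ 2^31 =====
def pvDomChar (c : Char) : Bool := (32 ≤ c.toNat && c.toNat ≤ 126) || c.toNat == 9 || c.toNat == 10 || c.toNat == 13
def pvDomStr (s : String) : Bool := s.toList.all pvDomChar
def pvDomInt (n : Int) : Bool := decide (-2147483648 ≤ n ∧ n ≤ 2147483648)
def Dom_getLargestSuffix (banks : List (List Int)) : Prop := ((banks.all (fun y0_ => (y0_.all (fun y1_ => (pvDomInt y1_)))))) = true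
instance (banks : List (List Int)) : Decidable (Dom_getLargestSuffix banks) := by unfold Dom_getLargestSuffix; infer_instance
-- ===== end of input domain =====

-- B replaces A's backward index-assignment pass by a forward monotonic stack of
-- (value, count) blocks that is expanded into the suffix-maximum array; alternative, not faster.

-- ===== PORT A =====
-- literal port of A: suffix = [0]*len(bank); suffix[-1] = bank[-1];
-- for i in reversed(range(len(bank)-1)): suffix[i] = max(bank[i], suffix[i+1])
def getLargestSuffix (banks : List (List Int)) : List (List Int) :=
  banks.foldl (fun largestSuffix bank =>
    let suffix := List.replicate bank.length (0 : Int)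
    let suffix := PySem.List.pySetD suffix (-1) (PySem.List.pyGetD bank (-1) 0)
    let suffix := ((PySem.List.pyRange 0 ((bank.length : Int) - 1) 1).reverse).foldl
      (fun suffix i =>
        PySem.List.pySetD suffix i
          (max (PySem.List.pyGetD bank i 0) (PySem.List.pyGetD suffix (i + 1) 0)))
      suffix
    largestSuffix ++ [suffix]) []

-- ===== PORT B =====
-- port of Source B's inner while loop: while blocks and blocks[-1][0] <= x: count += blocks.pop()[1]
def popLoop (x : Int) (blocks : List (Int × Int)) (count : Int) : List (Int × Int) × Int :=
  if h : blocks = [] then (blocks, count)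
  else
    let p := blocks.getLast h
    if p.1 ≤ x then popLoop x blocks.dropLast (count + p.2)
    else (blocks, count)
termination_by blocks.length
decreasing_by
  simpa [List.length_dropLast] using Nat.sub_lt (List.length_pos_iff.mpr h) Nat.one_pos

-- literal port of Source B: build the (value, count) block stack forward, then expand it
-- ([value] * count ports to List.replicate count.toNat value, exact for Python's list repetition)
def getLargestSuffix_alt (banks : List (List Int)) : List (List Int) :=
  banks.foldl (fun largestSuffix bank =>
    let blocks := bank.foldl (fun blocks x =>
      let r := popLoop x blocks 1
      r.1 ++ [(x, r.2)]) []
    let suffix := blocks.foldl (fun s p => s ++ List.replicate p.2.toNat p.1) []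
    largestSuffix ++ [suffix]) []

-- ===== PRECONDITION & SPEC =====
-- Pre_ excludes exactly the inputs containing an empty bank, on which A raises IndexError at suffix[-1].
def Pre_getLargestSuffix (banks : List (List Int)) : Prop := ∀ bank ∈ banks, bank ≠ []
instance (banks : List (List Int)) : Decidable (Pre_getLargestSuffix banks) := by
  unfold Pre_getLargestSuffix; infer_instance

def pvWitness_getLargestSuffix : List (List Int) := [[1, 2], [3]]

def Spec_getLargestSuffix (banks : List (List Int)) (out : List (List Int)) : Prop := out = getLargestSuffix_alt banks
instance (banks : List (List Int)) (out : List (List Int)) : Decidable (Spec_getLargestSuffix banks out) := by unfold Spec_getLargestSuffix; infer_instance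

-- ===== CLAIM (what is proved, stated in full; the proofs are below) =====
def Claim_equal_getLargestSuffix : Prop := ∀ (banks : List (List Int)), Dom_getLargestSuffix banks → Pre_getLargestSuffix banks → Spec_getLargestSuffix banks (getLargestSuffix banks)

-- ===== LEMMAS AND PROOFS =====

-- suffix maxima of a list (the common value both per-bank computations produce)
def smax : List Int → List Int
  | [] => []
  | x :: xs =>
    match smax xs with
    | [] => [x]
    | m :: ms => max x m :: m :: ms

-- A's per-bank body and B's per-bank body, as named helpers (defeq to the ports' lambdas)
def bodyA (bank : List Int) : List Int :=
  let suffix := List.replicate bank.length (0 : Int)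
  let suffix := PySem.List.pySetD suffix (-1) (PySem.List.pyGetD bank (-1) 0)
  ((PySem.List.pyRange 0 ((bank.length : Int) - 1) 1).reverse).foldl
    (fun suffix i =>
      PySem.List.pySetD suffix i
        (max (PySem.List.pyGetD bank i 0) (PySem.List.pyGetD suffix (i + 1) 0)))
    suffix

def bodyB (bank : List Int) : List Int :=
  let blocks := bank.foldl (fun blocks x =>
    let r := popLoop x blocks 1
    r.1 ++ [(x, r.2)]) []
  blocks.foldl (fun s p => s ++ List.replicate p.2.toNat p.1) []

theorem foldl_acc_map {α : Type} (g : α → List Int) :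
    ∀ (l : List α) (acc : List (List Int)),
      l.foldl (fun a b => a ++ [g b]) acc = acc ++ l.map g := by
  intro l
  induction l with
  | nil => simp
  | cons x xs ih => intro acc; simp [List.foldl_cons, ih]

theorem getLargestSuffix_eq_map (banks : List (List Int)) :
    getLargestSuffix banks = banks.map bodyA := by
  show banks.foldl (fun a b => a ++ [bodyA b]) [] = banks.map bodyA
  rw [foldl_acc_map]; simp

theorem getLargestSuffix_alt_eq_map (banks : List (List Int)) :
    getLargestSuffix_alt banks = banks.map bodyB := by
  show banks.foldl (fun a b => a ++ [bodyB b]) [] = banks.map bodyB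
  rw [foldl_acc_map]; simp

-- ---------- A side: bodyA = smax (for nonempty banks) ----------

theorem length_smax : ∀ xs : List Int, (smax xs).length = xs.length := by
  intro xs
  induction xs with
  | nil => simp [smax]
  | cons x xs ih =>
    cases h : smax xs with
    | nil => rw [h] at ih; simp at ih; simp [smax, h, ih]
    | cons m ms => rw [h] at ih; simp at ih; simp [smax, h]; omega

theorem smax_ne_nil (xs : List Int) (h : xs ≠ []) : smax xs ≠ [] := by
  intro hc
  have := length_smax xs
  rw [hc] at this
  exact h (List.eq_nil_of_length_eq_zero this.symm)

theorem set_repl : ∀ (k : Nat) (l : List Int) (v : Int),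
    (List.replicate (k + 1) (0 : Int) ++ l).set k v = List.replicate k 0 ++ v :: l := by
  intro k
  induction k with
  | zero => intro l v; simp [List.replicate_succ]
  | succ k ih =>
    intro l v
    rw [List.replicate_succ, List.cons_append, List.set_cons_succ, ih,
      List.replicate_succ, List.cons_append]

theorem loopA (bank : List Int) : ∀ (k : Nat), k < bank.length →
    ((PySem.List.pyRange 0 (k : Int) 1).reverse).foldl
      (fun suffix i =>
        PySem.List.pySetD suffix i
          (max (PySem.List.pyGetD bank i 0) (PySem.List.pyGetD suffix (i + 1) 0)))
      (List.replicate k (0 : Int) ++ smax (bank.drop k))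
    = smax bank := by
  intro k
  induction k with
  | zero => intro _; simp
  | succ k ih =>
    intro hk
    have hcast : ((k + 1 : Nat) : Int) = (k : Int) + 1 := by push_cast; ring
    rw [hcast, PySem.List.pyRange_one_succ_right (by positivity), List.reverse_append]
    simp only [List.reverse_cons, List.reverse_nil, List.nil_append, List.singleton_append,
      List.foldl_cons]
    have hdrop1 : bank.drop (k + 1) ≠ [] := by
      intro hc
      have := List.length_drop (l := bank) (i := k + 1)
      rw [hc] at this
      simp at this
      omega
    obtain ⟨m, ms, hm⟩ := List.exists_cons_of_ne_nil (smax_ne_nil _ hdrop1)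
    have hget1 : PySem.List.pyGetD
        (List.replicate (k + 1) (0 : Int) ++ smax (bank.drop (k + 1))) ((k : Int) + 1) 0 = m := by
      rw [← hcast, PySem.List.pyGetD_natCast, hm]
      rw [List.getD_eq_getElem?_getD, List.getElem?_append_right (by simp)]
      simp
    have hgetb : PySem.List.pyGetD bank (k : Int) 0 = bank[k] := by
      rw [PySem.List.pyGetD_natCast, List.getD_eq_getElem?_getD, List.getElem?_eq_getElem (by omega)]
      rfl
    have hset : PySem.List.pySetD
        (List.replicate (k + 1) (0 : Int) ++ smax (bank.drop (k + 1))) (k : Int)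
        (max bank[k] m)
        = List.replicate k (0 : Int) ++ smax (bank.drop k) := by
      rw [PySem.List.pySetD_natCast, hm, set_repl]
      have hdk : bank.drop k = bank[k] :: bank.drop (k + 1) :=
        List.drop_eq_getElem_cons (by omega)
      rw [hdk, smax, hm]
    rw [hget1, hgetb, hset]
    exact ih (by omega)

theorem bodyA_concat (l : List Int) (a : Int) : bodyA (l ++ [a]) = smax (l ++ [a]) := by
  unfold bodyA
  simp only [PySem.List.pyGetD_neg_one_append_singleton]
  have hlen : (l ++ [a]).length = l.length + 1 := by simp
  have hinit : PySem.List.pySetD (List.replicate (l ++ [a]).length (0 : Int)) (-1) a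
      = List.replicate l.length (0 : Int) ++ [a] := by
    simp only [PySem.List.pySetD, PySem.List.pySet?, PySem.List.pyIdx?, hlen]
    norm_num
    have := set_repl l.length [] a
    simpa using this
  rw [hinit]
  have hb : ((l ++ [a]).length : Int) - 1 = ((l.length : Nat) : Int) := by
    rw [hlen]; push_cast; ring
  rw [hb]
  have hrepl : List.replicate l.length (0 : Int) ++ [a]
      = List.replicate l.length (0 : Int) ++ smax ((l ++ [a]).drop l.length) := by
    rw [List.drop_left]
    simp [smax]
  rw [hrepl]
  exact loopA (l ++ [a]) l.length (by simp)

-- ---------- B side: bodyB = smax ----------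

-- the popping loop, rephrased on the reversed stack (head = top)
def popR (x : Int) : List (Int × Int) → Int → List (Int × Int) × Int
  | [], c => ([], c)
  | p :: t, c => if p.1 ≤ x then popR x t (c + p.2) else (p :: t, c)

theorem popLoop_reverse (x : Int) :
    ∀ (r : List (Int × Int)) (c : Int),
      popLoop x r.reverse c = ((popR x r c).1.reverse, (popR x r c).2) := by
  intro r
  induction r with
  | nil => intro c; rw [popLoop]; simp [popR]
  | cons p t ih =>
    intro c
    rw [popLoop]
    have hne : t.reverse ++ [p] ≠ [] := by simp
    simp only [List.reverse_cons, dif_neg hne]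
    rw [List.getLast_append_singleton, List.dropLast_concat]
    by_cases hle : p.1 ≤ x
    · simp [hle, ih, popR]
    · simp [hle, popR]

-- one forward step on the reversed stack
def stepR (r : List (Int × Int)) (x : Int) : List (Int × Int) :=
  ((x, (popR x r 1).2) :: (popR x r 1).1)

-- expansion of a reversed stack into the suffix array
def exR (r : List (Int × Int)) : List Int :=
  r.reverse.flatMap (fun p => List.replicate p.2.toNat p.1)

theorem exR_cons (p : Int × Int) (r : List (Int × Int)) :
    exR (p :: r) = exR r ++ List.replicate p.2.toNat p.1 := by
  simp [exR]

-- invariant: values strictly increase from the top, counts are positive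
def Good (r : List (Int × Int)) : Prop :=
  List.Pairwise (fun p q => p.1 < q.1) r ∧ ∀ p ∈ r, 1 ≤ p.2

theorem smax_append (l : List Int) (x : Int) :
    smax (l ++ [x]) = (smax l).map (fun v => max v x) ++ [x] := by
  induction l with
  | nil => simp [smax]
  | cons y l ih =>
    cases h : smax l with
    | nil =>
      have : l = [] := by
        have := length_smax l; rw [h] at this; simpa using (List.eq_nil_of_length_eq_zero this.symm)
      subst this
      simp [smax]
    | cons m ms =>
      have h1 : smax (l ++ [x]) = max m x :: ms.map (fun v => max v x) ++ [x] := by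
        rw [ih, h]; simp
      show smax (y :: (l ++ [x])) = _
      rw [smax, h1]
      simp [smax, h, max_assoc]

theorem map_max_id (x : Int) : ∀ (r : List (Int × Int)), (∀ p ∈ r, x ≤ p.1) →
    (exR r).map (fun v => max v x) = exR r := by
  intro r
  induction r with
  | nil => intro _; simp [exR]
  | cons p t ih =>
    intro h
    rw [exR_cons, List.map_append, ih (fun q hq => h q (List.mem_cons_of_mem _ hq))]
    have : max p.1 x = p.1 := max_eq_left (h p (List.mem_cons_self))
    simp [this]

theorem popR_spec (x : Int) : ∀ (r : List (Int × Int)) (c : Int), Good r → 1 ≤ c →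
    (exR (popR x r c).1 ++ List.replicate (popR x r c).2.toNat x
        = (exR r).map (fun v => max v x) ++ List.replicate c.toNat x)
    ∧ Good ((x, (popR x r c).2) :: (popR x r c).1)
    ∧ 1 ≤ (popR x r c).2 := by
  intro r
  induction r with
  | nil =>
    intro c _ hc
    refine ⟨by simp [popR, exR], ?_, by simpa [popR] using hc⟩
    constructor
    · simp [popR]
    · intro p hp; simp [popR] at hp; subst hp; simpa using hc
  | cons p t ih =>
    intro c hg hc
    have hgt : Good t := ⟨hg.1.of_cons, fun q hq => hg.2 q (List.mem_cons_of_mem _ hq)⟩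
    have hp1 : 1 ≤ p.2 := hg.2 p List.mem_cons_self
    by_cases hle : p.1 ≤ x
    · have hc' : 1 ≤ c + p.2 := by omega
      obtain ⟨ih1, ih2, ih3⟩ := ih (c + p.2) hgt hc'
      have heq : popR x (p :: t) c = popR x t (c + p.2) := by simp [popR, hle]
      refine ⟨?_, by rw [heq]; exact ih2, by rw [heq]; exact ih3⟩
      rw [heq, ih1, exR_cons, List.map_append, List.map_replicate]
      have hmax : max p.1 x = x := max_eq_right hle
      have hcnt : (c + p.2).toNat = p.2.toNat + c.toNat := by omega
      rw [hmax, hcnt, List.replicate_add, List.append_assoc]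
    · have heq : popR x (p :: t) c = (p :: t, c) := by simp [popR, hle]
      have hall : ∀ q ∈ p :: t, x < q.1 := by
        intro q hq
        rcases List.mem_cons.mp hq with h | h
        · subst h; omega
        · have := (List.pairwise_cons.mp hg.1).1 q h
          omega
      refine ⟨?_, ?_, by rw [heq]; exact hc⟩
      · rw [heq, map_max_id x (p :: t) (fun q hq => le_of_lt (hall q hq))]
      · rw [heq]
        refine ⟨List.pairwise_cons.mpr ⟨hall, hg.1⟩, ?_⟩
        intro q hq
        rcases List.mem_cons.mp hq with h | h
        · subst h; exact hc
        · exact hg.2 q h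

theorem stepR_spec (x : Int) (r : List (Int × Int)) (l : List Int)
    (hg : Good r) (he : exR r = smax l) :
    Good (stepR r x) ∧ exR (stepR r x) = smax (l ++ [x]) := by
  obtain ⟨h1, h2, h3⟩ := popR_spec x r 1 hg (by norm_num)
  refine ⟨h2, ?_⟩
  rw [stepR, exR_cons, smax_append, ← he]
  have : List.replicate ((popR x r 1).2.toNat) x
      = List.replicate (popR x r 1).2.toNat x := rfl
  calc exR (popR x r 1).1 ++ List.replicate (popR x r 1).2.toNat x
      = (exR r).map (fun v => max v x) ++ List.replicate (1 : Int).toNat x := h1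
    _ = (exR r).map (fun v => max v x) ++ [x] := by norm_num

theorem foldB_eq_foldR (bank : List Int) :
    ∀ (r : List (Int × Int)),
      bank.foldl (fun blocks x =>
        let r := popLoop x blocks 1
        r.1 ++ [(x, r.2)]) r.reverse
      = (bank.foldl stepR r).reverse := by
  induction bank with
  | nil => intro r; simp
  | cons x t ih =>
    intro r
    simp only [List.foldl_cons]
    have h : (let r0 := popLoop x r.reverse 1; r0.1 ++ [(x, r0.2)]) = (stepR r x).reverse := by
      simp [popLoop_reverse, stepR]
    rw [h, ih]

theorem fold_inv (bank : List Int) : ∀ (r : List (Int × Int)) (l : List Int),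
    Good r → exR r = smax l →
    Good (bank.foldl stepR r) ∧ exR (bank.foldl stepR r) = smax (l ++ bank) := by
  induction bank with
  | nil => intro r l hg he; simpa using ⟨hg, he⟩
  | cons x t ih =>
    intro r l hg he
    obtain ⟨hg', he'⟩ := stepR_spec x r l hg he
    have := ih (stepR r x) (l ++ [x]) hg' he'
    simpa using this

theorem bodyB_eq_smax (bank : List Int) : bodyB bank = smax bank := by
  unfold bodyB
  have h1 : bank.foldl (fun blocks x =>
      let r := popLoop x blocks 1
      r.1 ++ [(x, r.2)]) [] = (bank.foldl stepR []).reverse := by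
    simpa using foldB_eq_foldR bank []
  rw [h1]
  have hinv := fold_inv bank [] [] ⟨List.Pairwise.nil, by simp⟩ (by simp [exR, smax])
  have : ((bank.foldl stepR []).reverse).foldl (fun s p => s ++ List.replicate p.2.toNat p.1) []
      = exR (bank.foldl stepR []) := by
    rw [exR, PySem.List.foldl_append_eq_flatMap]
    simp
  rw [this, hinv.2]
  simp

theorem body_eq (bank : List Int) (h : bank ≠ []) : bodyA bank = bodyB bank := by
  obtain ⟨l, a, rfl⟩ := (List.eq_nil_or_concat bank).resolve_left h
  rw [List.concat_eq_append, bodyA_concat, bodyB_eq_smax]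

-- ===== VERDICT (by name: the statement is the Claim_ definition above) =====
theorem getLargestSuffix_spec : Claim_equal_getLargestSuffix := by
  intro banks _ hpre
  unfold Spec_getLargestSuffix
  rw [getLargestSuffix_eq_map, getLargestSuffix_alt_eq_map]
  exact List.map_congr_left (fun b hb => body_eq b (hpre b hb))
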